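/- GENERATED by mk_final_copies.py from the proof of the farm's unit `start_decoder.F2a` (farm:start_decoder.F2a.1: Lemmas.lean) as the
   re-elaboration sweep compiled it — do not edit. -/
import Asan.CheckWalk
import Vorbis.Spec.StartDecoderBTest
import Vorbis.Spec.Units.start_decoder_F2a
import Vorbis.Spec.StartDecoderFloor

/-!
  HEAD START for unit `start_decoder.F2a` (from the first worker of `start_decoder.F2`, farm attempt start_decoder.F2.1; compiles in the
  unit's namespace). `f2_head` is THE MACHINE PART of the unit, PROVED: 0x11526a … the exit `jle 1158f8` (→ `AtHeadExit`: plain machine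
  facts) or the return of `get_bits(f, 16)` at 0x115293 (→ `After1`: `SameExcept` over the literal windows `wins1`, the callee's post).
  THE PURE PART (this worker): `f2a_of_after1` (`After1` → `AtF2a`: `Floor.carry` over `wins1`, all six windows are
  `Floor.Win … 1596 1596`) and `f2a_of_exit` (`AtHeadExit` → `AtR1`: `Floor.carry_done` — the exit has `i = floor_count`, no `hlt` —
  then `F2.atR1_of_loop`); `f2a_test` reads the branch condition of 0x115280 as `floor_count ≤ i`.
-/

namespace Vorbis.Spec.start_decoder_F2a
open X86 X86.User Asan Vorbis Vorbis.Spec Vorbis.Spec.StartDecoder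

set_option maxRecDepth 4000
set_option maxHeartbeats 4000000

/-- **Where `*f` is at every cut point of start_decoder**: inside the data space above the text, and either above the
return-address slot (a stack object of a CALLER's protected frame: `Frame.callers`) or below the stack region. One arithmetic
fact for `u_omega`, over the entry state's registers (`g.f = (g.e.reg .rdi).toNat`, `g.RA = (g.e.reg .rsp).toNat`). -/
theorem f2a_obj_where {u₀ : State} {g : Ghost} {pc : Word} {A : Arena × List Obj} {v : State} (hfr : Frame u₀ g pc A v)
    (hh : g.Hand A) :
    (0x119d40 ≤ (g.e.reg .rdi).toNat ∧ (g.e.reg .rdi).toNat + 1808 ≤ 0xC00000) ∧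
      ((g.e.reg .rsp).toNat + 8 ≤ (g.e.reg .rdi).toNat ∨ (g.e.reg .rdi).toNat + 1808 ≤ 0x700000) := by
  have hobj' : LiveIn A.2 g.frames' g.f Off.sizeof.stb_vorbis := hh.obj.mono (frames'_sub g A.2)
  have hw := hobj'.where_ hfr.shadow hfr.offText (by decide)
  have hF : g.f = (g.e.reg .rdi).toNat := rfl
  have hRA : g.RA = (g.e.reg .rsp).toNat := rfl
  obtain ⟨hra1, hra2, hra3⟩ := hfr.ra
  simp only [Off.sizeof.stb_vorbis] at hw
  rw [hF] at hw
  refine ⟨⟨hw.1, hw.2.1⟩, ?_⟩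
  obtain ⟨o, ho, k1, k2⟩ := hh.obj
  simp only [Off.sizeof.stb_vorbis] at k2
  rw [hF] at k1 k2
  rcases List.mem_append.mp ho with hs | hoth
  · -- a stack object of a caller's protected frame: the frame lies above the return-address slot
    unfold stackObjs at hs
    obtain ⟨bF, hbF, hin⟩ := List.mem_flatMap.mp hs
    have hmem : bF ∈ g.frames' := List.mem_cons_of_mem _ hbF
    obtain ⟨a1, a2, _, _, _⟩ := hfr.shadow.stack.active bF hmem
    have hg := FrameLayout.objsAt_gran a1 a2 hin
    have hc := hfr.callers bF hbF
    have e : o.gLo = o.base / 8 := rfl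
    rw [hRA] at hc hra1
    left
    omega
  · -- any other live object is off the stack region
    have hoff := hfr.shadow.off o hoth
    unfold OffStack at hoff
    rw [hRA] at hra3
    omega

/-- The footprint of the first piece (0x11526a … 0x115293), over the memory of the segment's entry state: the stack below the
steady rsp (the pushed return addresses, the callee's frames) and the five windows of `get_bits` in `*f`. A LITERAL list over
the entry state's registers (`u_same` / `u_frame` see through nothing else). -/
def wins1 (g : Ghost) : List Span :=
  [⟨(g.e.reg .rsp).toNat - 1888, (g.e.reg .rsp).toNat - 1480⟩,
   ⟨(g.e.reg .rdi).toNat + 48, (g.e.reg .rdi).toNat + 56⟩, ⟨(g.e.reg .rdi).toNat + 84, (g.e.reg .rdi).toNat + 96⟩,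
   ⟨(g.e.reg .rdi).toNat + 136, (g.e.reg .rdi).toNat + 144⟩, ⟨(g.e.reg .rdi).toNat + 1484, (g.e.reg .rdi).toNat + 1749⟩,
   ⟨(g.e.reg .rdi).toNat + 1752, (g.e.reg .rdi).toNat + 1784⟩]

/-- **The exit 0x115280 → 0x1158f8 of the loop head, as plain machine facts** (`v` = the segment's entry state, `w` = now): only
the return address of the check call was stored (below the steady rsp); `floor_count ≤ i` as the branch saw it. What is left to
do from here is pure: `AtR1 u₀ g w` from `BodyF2 … v` and these facts (`CarryGoal`, then `Mid 5 5 6 → Mid 6 6 6`). -/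
structure AtHeadExit (u₀ : State) (g : Ghost) (i : Nat) (v w : State) : Prop where
  rip : w.rip = pc_R1
  rsp : w.reg .rsp = g.e.reg .rsp - 1480
  rbp : w.reg .rbp = g.e.reg .rdi
  /-- the one store: the return address of `call __asan_load4_noabort`, at `[R − 8]` -/
  mem : w.mem = v.mem.writeLE (g.e.reg .rsp - 1488) 8 1135222
  /-- the same as a footprint: only `[R − 8, R)` differs -/
  same : Mem.SameExcept [⟨(g.e.reg .rsp).toNat - 1488, (g.e.reg .rsp).toNat - 1480⟩] v.mem w.mem
  /-- no store went to the shadow -/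
  untouched : ShadowUntouched v.mem w.mem
  code : Mem.EqOn L.textLo L.textHi u₀.mem w.mem
  inv : abiInv w
  /-- `jle` taken: `floor_count ≤ i` (signed 32-bit compare of the dword at `f + B0H` with the dword at `[R + 18H]`) -/
  ge : (BitVec.ofNat 32 (v.mem.readLE (g.e.reg .rdi + 176) 4)).toInt ≤ (BitVec.ofNat 32 i).toInt

/-- **The state at 0x115293, after `get_bits(f, 16)` returned, as plain machine facts**: the footprint so far over the LITERAL
windows `wins1`, the callee's post (`Bits` kept, the result `< 2^16` in rax), `i < floor_count` as the branch saw it. The next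
piece (the store of `floor_types[i]`, the dispatch) starts here. -/
structure After1 (u₀ : State) (g : Ghost) (i : Nat) (A : Arena × List Obj) (v w : State) : Prop where
  rip : w.rip = L.start_decoder.cut190
  rsp : w.reg .rsp = g.e.reg .rsp - 1480
  rbp : w.reg .rbp = g.e.reg .rdi
  same : Mem.SameExcept (wins1 g) v.mem w.mem
  code : Mem.EqOn L.textLo L.textHi u₀.mem w.mem
  inv : abiInv w
  /-- the callee's post, over the memory at the call (the entry memory + the pushed return address) -/
  post : GetBitsPost (g.Blk A) g.len (v.mem.writeLE (g.e.reg .rsp - 1488) 8 1135251) w.mem g.f 16 (w.reg .rax).toNat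
  untouched : ShadowUntouched v.mem w.mem
  /-- `jle` not taken: `i < floor_count` -/
  lt : ¬ (BitVec.ofNat 32 (v.mem.readLE (g.e.reg .rdi + 176) 4)).toInt ≤ (BitVec.ofNat 32 i).toInt

/-- **The first piece of segment F2, machine part** (0x11526a `lea rdi,[rbp+0xb0] ; call __asan_load4_noabort ; mov eax,[rsp+0x18] ;
cmp [rbp+0xb0],eax ; jle 1158f8 ; mov esi,0x10 ; mov rdi,rbp ; call get_bits`, stb_vorbis_fixed.c:3966–3967): from the entry
assertion `BodyF2` to the exit of the floor loop (`AtHeadExit`) or to the return of `get_bits(f, 16)` (`After1`). -/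
theorem f2_head (Lay : Layout) (hLay : Lay.hi = 0x1000000) (μ : Microarch) (hμ : UserX.MicroOK μ) (u₀ : State)
    (hcode : HasCodeNat Lay u₀ Vorbis.L.start_decoder.entry Vorbis.Code.code_start_decoder.nat Vorbis.L.start_decoder.size)
    (hload4 : Asan.SmallCheck Lay μ Vorbis.WayInv (Vorbis.CodeOK u₀) [.rax, .rcx, .rdx] 4 Vorbis.L.__asan_load4_noabort.entry)
    (hgb : ∀ (others : List Obj) (frames : List (Nat × FrameLayout)) (Blk : Block → Prop) (len : Nat),
      Calls Lay μ Vorbis.WayInv (Vorbis.conv u₀) Vorbis.L.get_bits.entry (Vorbis.Spec.get_bits.spec others frames Blk len))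
    (g : Ghost) (i : Nat) (A5 : Arena) (A : Arena × List Obj) (v : State) (hb : BodyF2 u₀ g i A5 A v) :
    ReachVia Lay μ WayInv v (fun w => AtHeadExit u₀ g i v w ∨ After1 u₀ g i A v w) := by
  have hfr := hb.frame
  have he := hfr.entry
  -- 1. the ENTRY state's facts
  v_entry he
  clear he_eq he_df he_mx he_sse he_code he_inv
  simp only [depth] at he_room he_stack
  -- 2. the PRESENT state's facts (NOT under `w_` names: the walker clears those after the first step)
  have w_rip := hfr.rip
  have hR : g.R = (g.e.reg .rsp).toNat - 1480 := rfl
  have hF : g.f = (g.e.reg .rdi).toNat := rfl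
  have b_rsp : v.reg .rsp = g.e.reg .rsp - 1480 := by
    have h1 : (v.reg .rsp).toNat = (g.e.reg .rsp).toNat - 1480 := by
      rw [hfr.rsp, toNat_addr _ (by omega), hR]
    u_omega
  have b_rbp : v.reg .rbp = g.e.reg .rdi := by
    rw [hb.rbp, hF]
    exact addr_toNat _
  have w_eq : Mem.EqOn Vorbis.L.textLo Vorbis.L.textHi u₀.mem v.mem := hfr.code
  have hdf : v.flags .df = false := (show abiInv _ from hfr.inv).1
  have hmx : v.mxcsr &&& 0x1F80 = 0x1F80 := (show abiInv _ from hfr.inv).2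
  have hsse := Vorbis.sseOK_of_abiInv hfr.inv
  have hgb' := hgb A.2 g.frames' (g.Blk A) g.len
  -- where `*f` is
  obtain ⟨hfin, hfw⟩ := f2a_obj_where hfr hb.hand
  -- 3. the loads: the counter `i` in `[R + 18H]`, `floor_count`
  have r_cnt : v.mem.readLE (g.e.reg .rsp - 1456) 4 = i := by
    have h1 : v.mem.readLE (addr (g.R + 0x18)) 4 = i := hb.cnt
    have h2 : addr (g.R + 0x18) = g.e.reg .rsp - 1456 := by
      rw [hR]
      unfold addr
      u_omega
    rw [← h2]
    exact h1
  obtain ⟨fc, r_fc⟩ : ∃ fc, v.mem.readLE (g.e.reg .rdi + 176) 4 = fc := ⟨_, rfl⟩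
  -- 4. the walk
  u_walk hcode [hμ.vendor] until [Vorbis.L.start_decoder.cut230] span [Vorbis.L.textLo, Vorbis.L.textHi] side (v_side)
  case check_115271 =>
    -- 0x115271 load4 `f + B0H`: a field of `*f` (OB1)
    have hun : ShadowUntouched v.mem s_115271.mem := by v_untouched
    have hs : Site (Asan.Live (stackObjs g.frames' ++ A.2)) (g.f + 176) 4 :=
      Vorbis.site_floor_count hb.mid.env.live hb.mid.bits.OB1 (by simp only [voff])
    exact Vorbis.Spec.check_site hfr.shadow hun hs (by u_omega)
  case call_inv =>
    refine Vorbis.abiInv_of ?_ ?_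
    · rw [w_flags]
      simp only [X86.User.df_setStatus]
      exact w_df_115271
    · rw [w_mxcsr]
      exact hmx
  case pre_11528e =>
    -- `ReaderPre` of `get_bits(f, 16)`: the shadow clause, the environment, `Bits` over the pushed return address
    have hun : ShadowUntouched v.mem s_11528e.mem := by v_untouched
    have hrdi : (s_11528e.reg .rdi).toNat = g.f := by
      rw [w_rdi, hF]
    refine ⟨⟨shadowPre_call hfr (by rw [w_rsp, hR]; u_omega) hun, ?_, ?_⟩, ?_⟩
    · rw [hrdi]
      exact readerEnv_mid hb.hand hb.mid
    · rw [hrdi, w_mem]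
      exact (Vorbis.Spec.Reader.store_off_obj hb.mid.bits _ 8 _ (by u_omega) (by u_omega)).1.bits
    · unfold bitsArg
      rw [w_rsi]
      decide
  · -- 0x115280 `jle 1158f8` taken: the exit of loop 3966
    refine ReachVia.done (Or.inl ⟨w_rip, w_rsp, ?_, w_mem, ?_, ?_, w_eq, ?_, ?_⟩)
    · rw [w_kept .rbp rfl]
      exact b_rbp
    · u_same
    · v_untouched
    · refine Vorbis.abiInv_of ?_ ?_
      · rw [w_flags]
        simp only [X86.User.df_setStatus]
        exact w_df_115271
      · rw [w_mxcsr]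
        exact hmx
    · rw [r_fc]
      exact hbr_115280
  · -- 0x115293: `get_bits(f, 16)` returned. THE RECIPE.
    v_after_call w_rsp_11528e w_mem_11528e
    simp only [w_rdi_11528e] at w_same
    have hsame : Mem.SameExcept
        [⟨(g.e.reg .rsp).toNat - 1888, (g.e.reg .rsp).toNat - 1480⟩,
         ⟨(g.e.reg .rdi).toNat + 48, (g.e.reg .rdi).toNat + 56⟩, ⟨(g.e.reg .rdi).toNat + 84, (g.e.reg .rdi).toNat + 96⟩,
         ⟨(g.e.reg .rdi).toNat + 136, (g.e.reg .rdi).toNat + 144⟩, ⟨(g.e.reg .rdi).toNat + 1484, (g.e.reg .rdi).toNat + 1749⟩,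
         ⟨(g.e.reg .rdi).toNat + 1752, (g.e.reg .rdi).toNat + 1784⟩] v.mem s_11528er.mem := by
      u_same
    have hpost : GetBitsSpecPost (g.Blk A) g.len (s_11528e.reg .rdi).toNat (bitsArg s_11528e) s_11528e s_11528er := w_post
    have hrdi : (s_11528e.reg .rdi).toNat = g.f := by
      rw [w_rdi_11528e, hF]
    have harg : bitsArg s_11528e = 16 := by
      unfold bitsArg
      rw [w_rsi_11528e]
      decide
    rw [hrdi, harg] at hpost
    have hun0 : ShadowUntouched v.mem s_11528e.mem := by
      rw [w_mem_11528e]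
      v_untouched
    refine ReachVia.done (Or.inr ⟨w_rip, w_rsp, ?_, hsame, w_eq, Vorbis.abiInv_of w_df w_mx, ?_, ?_, ?_⟩)
    · rw [w_kept .rbp rfl]
      exact b_rbp
    · have hp := hpost.bits
      rw [w_mem_11528e] at hp
      exact hp
    · exact Mem.EqOn.trans hun0 hpost.untouched
    · rw [r_fc]
      exact hbr_115280

/-- The loop test of line 3966 as the branch at 0x115280 saw it (a signed compare of two dwords), in the terms of the assertions:
`floor_count ≤ i` as integers, for a counter `i ≤ floor_count ≤ 64`. -/
theorem f2a_test {u₀ : State} {g : Ghost} {pc : Word} {i : Nat} {A5 : Arena} {A : Arena × List Obj} {v : State}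
    (h : FloorLoop u₀ g pc i A5 A v) :
    ((BitVec.ofNat 32 (v.mem.readLE (g.e.reg .rdi + 176) 4)).toInt ≤ (BitVec.ofNat 32 i).toInt) ↔
      stb_vorbis.floor_count v.mem g.f ≤ (i : Int) := by
  have hfc := h.floors.FL1
  have hile := h.i_le
  have hF : g.f = (g.e.reg .rdi).toNat := rfl
  have ea : addr (g.f + 176) = g.e.reg .rdi + 176 := by
    rw [hF]
    unfold addr
    u_omega
  have e1 : stb_vorbis.floor_count v.mem g.f = sint32 (v.mem.readLE (g.e.reg .rdi + 176) 4) := by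
    simp only [vacc, voff]
    rw [Mem.i32_def, Mem.u32, ea]
  have hlt4 : v.mem.readLE (g.e.reg .rdi + 176) 4 < 2 ^ 32 := Mem.readLE_lt' v.mem _ 4
  have hi : i < 2 ^ 32 := by omega
  rw [toInt_ofNat32 _ hlt4, toInt_ofNat32 _ hi, ← e1]
  have c := sint32_cases i
  omega

/-- The steady stack pointer of the assertions (`addr g.R`) is the walker's `g.e.reg .rsp - 1480`. -/
theorem f2a_rsp {u₀ : State} {g : Ghost} {pc : Word} {A : Arena × List Obj} {v : State} (hf : Frame u₀ g pc A v) :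
    g.e.reg .rsp - 1480 = addr g.R := by
  have e := Floor.rsp_slot hf 0 1480 (by omega)
  rw [Nat.add_zero] at e
  exact e.symm

/-- **The return of `get_bits(f, 16)` (0x115293) is `AtF2a`**: the loop assertion carried over the callee's windows (`Floor.carry`),
the test `i < floor_count` read in the new memory (`Floor.fields_same`), the sixteen bits in rax. -/
theorem f2a_of_after1 {u₀ : State} {g : Ghost} {i : Nat} {A5 : Arena} {A : Arena × List Obj} {v w : State}
    (hb : BodyF2 u₀ g i A5 A v) (h : After1 u₀ g i A v w) : AtF2a u₀ g i w := by
  have hloop : FloorLoop u₀ g pc_F2 i A5 A v := hb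
  have hlt : (i : Int) < stb_vorbis.floor_count v.mem g.f := by
    have h1 := h.lt
    rw [f2a_test hloop] at h1
    omega
  have hgeo := Floor.geo hloop hlt
  have hrsp : w.reg .rsp = addr g.R := by
    rw [h.rsp]
    exact f2a_rsp hloop.frame
  have hrbp : w.reg .rbp = addr g.f := by
    rw [h.rbp]
    exact (addr_toNat _).symm
  have hsame := h.same
  unfold wins1 at hsame
  have hRA : g.RA = (g.e.reg .rsp).toNat := rfl
  have hR : g.R = (g.e.reg .rsp).toNat - 1480 := rfl
  have hF : g.f = (g.e.reg .rdi).toNat := rfl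
  have hws : ∀ x, x ∈ [(⟨(g.e.reg .rsp).toNat - 1888, (g.e.reg .rsp).toNat - 1480⟩ : Span),
      ⟨(g.e.reg .rdi).toNat + 48, (g.e.reg .rdi).toNat + 56⟩, ⟨(g.e.reg .rdi).toNat + 84, (g.e.reg .rdi).toNat + 96⟩,
      ⟨(g.e.reg .rdi).toNat + 136, (g.e.reg .rdi).toNat + 144⟩, ⟨(g.e.reg .rdi).toNat + 1484, (g.e.reg .rdi).toNat + 1749⟩,
      ⟨(g.e.reg .rdi).toNat + 1752, (g.e.reg .rdi).toNat + 1784⟩] → Floor.Win g (floorAt g v.mem i) 1596 1596 x := by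
    intro x hx
    simp only [List.mem_cons, List.mem_nil_iff, or_false] at hx
    rcases hx with rfl | rfl | rfl | rfl | rfl | rfl <;> unfold Floor.Win <;> simp only [] <;> omega
  have hloop' : FloorLoop u₀ g L.start_decoder.cut190 i A5 A w :=
    Floor.carry (lo := 1596) (hi := 1596) hloop hlt (Nat.le_refl _) h.rip hrsp hrbp h.inv h.code hsame hws h.untouched
      h.post.bits
  obtain ⟨_, ecount, _, _⟩ := Floor.fields_same hgeo hsame hws (Nat.le_refl _)
  refine ⟨A5, A, hloop', ?_, ?_⟩
  · rw [ecount]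
    exact hlt
  · exact h.post.result.2 (by omega)

/-- **The exit of loop 3966 (0x115280 → 0x1158f8) is SD.6**: the loop assertion carried over the one pushed return address
(`Floor.carry_done`: here `i = floor_count`), then `F2.atR1_of_loop`. -/
theorem f2a_of_exit {u₀ : State} {g : Ghost} {i : Nat} {A5 : Arena} {A : Arena × List Obj} {v w : State}
    (hb : BodyF2 u₀ g i A5 A v) (h : AtHeadExit u₀ g i v w) : AtR1 u₀ g w := by
  have hloop : FloorLoop u₀ g pc_F2 i A5 A v := hb
  have hge : stb_vorbis.floor_count v.mem g.f ≤ (i : Int) := (f2a_test hloop).mp h.ge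
  have hrsp : w.reg .rsp = addr g.R := by
    rw [h.rsp]
    exact f2a_rsp hloop.frame
  have hrbp : w.reg .rbp = addr g.f := by
    rw [h.rbp]
    exact (addr_toNat _).symm
  have hRA : g.RA = (g.e.reg .rsp).toNat := rfl
  have hR : g.R = (g.e.reg .rsp).toNat - 1480 := rfl
  have hws : ∀ x, x ∈ [(⟨(g.e.reg .rsp).toNat - 1488, (g.e.reg .rsp).toNat - 1480⟩ : Span)] →
      g.RA - 1888 ≤ x.lo ∧ x.hi ≤ g.R + 8 := by
    intro x hx
    simp only [List.mem_cons, List.mem_nil_iff, or_false] at hx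
    subst hx
    simp only []
    omega
  have hloop' : FloorLoop u₀ g pc_R1 i A5 A w :=
    Floor.carry_done hloop h.rip hrsp hrbp h.inv h.code h.same hws h.untouched
  -- `floor_count` reads the same over the pushed return address
  have hfc1 := hloop.floors.FL1.1
  have hgeo : Floor.Geo g A v.mem 0 := Floor.geo_at hloop (by omega)
  have hwt : ∀ x, x ∈ [(⟨(g.e.reg .rsp).toNat - 1488, (g.e.reg .rsp).toNat - 1480⟩ : Span)] →
      Floor.WinT g 0 (floorAt g v.mem 0) 1596 1596 x := fun x hx => Or.inl (Or.inl (hws x hx))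
  obtain ⟨ecount, _⟩ := Floor.hdr_same hgeo h.same hwt (Nat.le_refl _)
  refine F2.atR1_of_loop hloop' ?_
  rw [ecount]
  exact hge

end Vorbis.Spec.start_decoder_F2a
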